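-- pv_equiv track=rewrite | github.com/Abjad/abjad | abjad/tools/segmenttools/Tags.py | has_reapplied_tag
-- ===== SOURCE A (Python) =====
-- def has_reapplied_tag(string: str) -> bool:
--     r'''Is true when ``string`` has reapplied tag.
--
--     ..  container:: example
--
--         >>> abjad.tags.has_persistence_tag('')
--         False
--
--         >>> abjad.tags.has_persistence_tag('FOO')
--         False
--
--         >>> abjad.tags.has_persistence_tag('FOO:REAPPLIED_CLEF')
--         True
--
--         >>> abjad.tags.has_persistence_tag('REAPPLIED_CLEF')
--         True
--
--     '''
--     if not isinstance(string, str):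
--         return False
--     words = string.split(':')
--     for word in words:
--         if word.startswith('REAPPLIED'):
--             return True
--     return False
-- ===== SOURCE B (Python) =====
-- def has_reapplied_tag(string: str) -> bool:
--     if not isinstance(string, str):
--         return False
--     return string.startswith('REAPPLIED') or ':REAPPLIED' in string
-- ===== Notes on version B (the rewrite author's own statement) =====
-- stated objective: idiomatic
-- what changed: Replaces the split(':') list plus a startswith loop by a single boundary-anchored check: a REAPPLIED segment exists iff the string starts with 'REAPPLIED' or contains ':REAPPLIED'.
import Mathlib
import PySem

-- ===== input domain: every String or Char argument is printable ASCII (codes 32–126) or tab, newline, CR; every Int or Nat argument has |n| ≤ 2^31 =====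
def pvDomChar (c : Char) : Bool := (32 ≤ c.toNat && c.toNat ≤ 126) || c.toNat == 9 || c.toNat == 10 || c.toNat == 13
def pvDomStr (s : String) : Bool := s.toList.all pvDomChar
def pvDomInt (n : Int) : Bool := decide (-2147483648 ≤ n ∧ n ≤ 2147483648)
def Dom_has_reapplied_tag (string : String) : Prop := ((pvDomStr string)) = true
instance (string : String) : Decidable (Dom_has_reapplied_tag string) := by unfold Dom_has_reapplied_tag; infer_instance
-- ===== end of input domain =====

-- B replaces A's split(':')-and-loop by a single boundary-anchored check
-- (starts with 'REAPPLIED' or contains ':REAPPLIED'); idiomatic, same cost.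

-- ===== PORT A =====
def has_reapplied_tag (string : String) : Bool :=
  match PySem.Str.split? string ":" with
  | none => false
  | some words => words.any (fun word => PySem.Str.startswith word "REAPPLIED")

-- ===== PORT B =====
def has_reapplied_tag_alt (string : String) : Bool :=
  PySem.Str.startswith string "REAPPLIED" || PySem.Str.isIn ":REAPPLIED" string

-- ===== PRECONDITION & SPEC =====
def Spec_has_reapplied_tag (string : String) (out : Bool) : Prop := out = has_reapplied_tag_alt string
instance (string : String) (out : Bool) : Decidable (Spec_has_reapplied_tag string out) := by unfold Spec_has_reapplied_tag; infer_instance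

-- ===== CLAIM (what is proved, stated in full; the proofs are below) =====
def Claim_equal_has_reapplied_tag : Prop := ∀ (string : String), Dom_has_reapplied_tag string → Spec_has_reapplied_tag string (has_reapplied_tag string)

-- ===== LEMMAS AND PROOFS =====

-- A word of the split starts with R iff R is a prefix of the remaining input up
-- to the next colon (needs ':' ∉ R).
theorem prefix_takeWhile_iff {R l : List Char} (hR : (':' : Char) ∉ R) :
    R <+: l.takeWhile (fun c => !(c == ':')) ↔ R <+: l := by
  constructor
  · intro h
    exact h.trans (List.takeWhile_prefix _)
  · intro h
    induction R generalizing l with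
    | nil => exact List.nil_prefix
    | cons a R ih =>
      rcases l with _ | ⟨b, l⟩
      · simp at h
      · obtain ⟨t, ht⟩ := h
        injection ht with hb ht'
        subst hb
        have ha : (a == ':') = false := by
          simp only [beq_eq_false_iff_ne]
          intro hEq; exact hR (by simp [hEq])
        simp only [List.takeWhile_cons, ha, Bool.not_false, if_true]
        obtain ⟨u, hu⟩ := ih (fun hm => hR (List.mem_cons_of_mem _ hm)) (l := l) ⟨t, ht'⟩
        exact ⟨u, by simp [hu]⟩

-- Invariant of splitOn.go for the single-character separator [':'].
theorem go_any_iff (R : List Char) (hR : (':' : Char) ∉ R)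
    (fuel : Nat) (l cur : List Char) (acc : List (List Char)) (hfuel : l.length ≤ fuel) :
    ((PySem.Chars.splitOn.go [':'] fuel l cur acc).any
        (fun w => PySem.Chars.startswith w R) = true)
      ↔ (∃ w ∈ acc, R <+: w) ∨ R <+: (cur.reverse ++ l.takeWhile (fun c => !(c == ':')))
          ∨ (':' :: R) <:+: l := by
  induction fuel generalizing l cur acc with
  | zero =>
    have hl : l = [] := by
      cases l with
      | nil => rfl
      | cons a l => simp at hfuel
    subst hl
    simp [PySem.Chars.splitOn.go, List.any_eq_true, PySem.Chars.startswith_iff]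
  | succ fuel ih =>
    cases l with
    | nil =>
      simp [PySem.Chars.splitOn.go, List.any_eq_true, PySem.Chars.startswith_iff]
    | cons c rest =>
      have hfuel' : rest.length ≤ fuel := by simpa using hfuel
      by_cases hc : c = ':'
      · subst hc
        have hstep : PySem.Chars.splitOn.go [':'] (fuel + 1) (':' :: rest) cur acc
            = PySem.Chars.splitOn.go [':'] fuel rest [] (cur.reverse :: acc) := by
          simp [PySem.Chars.splitOn.go, List.isPrefixOf]
        rw [hstep, ih rest [] (cur.reverse :: acc) hfuel']
        have htail : (':' :: R) <:+: (':' :: rest) ↔ R <+: rest ∨ (':' :: R) <:+: rest := by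
          rw [List.infix_cons_iff]
          constructor
          · rintro (⟨t, ht⟩ | h)
            · left; injection ht with _ h'; exact ⟨t, h'⟩
            · right; exact h
          · rintro (⟨t, ht⟩ | h)
            · exact Or.inl ⟨t, by simp [ht]⟩
            · exact Or.inr h
        constructor
        · rintro (⟨w, hw, hpre⟩ | hpre | hinf)
          · rcases List.mem_cons.mp hw with hw | hw
            · subst hw
              right; left; simpa using hpre
            · exact Or.inl ⟨w, hw, hpre⟩
          · right; right
            rw [htail]
            left
            exact (prefix_takeWhile_iff hR).mp (by simpa using hpre)
          · right; right; rw [htail]; right; exact hinf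
        · rintro (⟨w, hw, hpre⟩ | hpre | hinf)
          · exact Or.inl ⟨w, List.mem_cons_of_mem _ hw, hpre⟩
          · left
            refine ⟨cur.reverse, List.mem_cons_self, ?_⟩
            simpa using hpre
          · rw [htail] at hinf
            rcases hinf with h | h
            · right; left
              simpa using (prefix_takeWhile_iff hR).mpr h
            · right; right; exact h
      · have hstep : PySem.Chars.splitOn.go [':'] (fuel + 1) (c :: rest) cur acc
            = PySem.Chars.splitOn.go [':'] fuel rest (c :: cur) acc := by
          simp only [PySem.Chars.splitOn.go, List.isPrefixOf]
          rw [if_neg (by simp [Ne.symm hc])]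
        rw [hstep, ih rest (c :: cur) acc hfuel']
        have hcb : (c == ':') = false := by simpa using hc
        have hmid : (c :: cur).reverse ++ rest.takeWhile (fun c => !(c == ':'))
            = cur.reverse ++ (c :: rest).takeWhile (fun c => !(c == ':')) := by
          simp [hcb]
        have htail : (':' :: R) <:+: (c :: rest) ↔ (':' :: R) <:+: rest := by
          rw [List.infix_cons_iff]
          constructor
          · rintro (⟨t, ht⟩ | h)
            · injection ht with h' _; exact absurd h'.symm hc
            · exact h
          · exact Or.inr
        rw [hmid, htail]

-- Characterisation of A through the boundary-anchored conditions B tests.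
theorem chars_main (cs : List Char) :
    ((PySem.Chars.splitOn cs [':']).any
        (fun w => PySem.Chars.startswith w ("REAPPLIED".toList)) = true)
      ↔ ("REAPPLIED".toList <+: cs ∨ (':' :: "REAPPLIED".toList) <:+: cs) := by
  have hR : (':' : Char) ∉ "REAPPLIED".toList := by decide
  have h := go_any_iff ("REAPPLIED".toList) hR (cs.length + 1) cs [] []
    (Nat.le_succ _)
  rw [PySem.Chars.splitOn, h]
  simp only [List.mem_nil_iff, false_and, exists_false, List.reverse_nil, List.nil_append,
    false_or]
  exact or_congr (prefix_takeWhile_iff hR) Iff.rfl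

-- ===== VERDICT (by name: the statement is the Claim_ definition above) =====
theorem has_reapplied_tag_spec : Claim_equal_has_reapplied_tag := by
  intro string _
  unfold Spec_has_reapplied_tag has_reapplied_tag has_reapplied_tag_alt
  rw [PySem.Str.split?]
  have hsep : (":".toList.isEmpty) = false := by decide
  simp only [PySem.Chars.split?, hsep, Bool.false_eq_true, if_false, Option.map_some]
  rw [Bool.eq_iff_iff]
  rw [PySem.Str.startswith_eq, PySem.Str.isIn_eq]
  rw [Bool.or_eq_true, PySem.Chars.startswith_iff, PySem.Chars.isIn_iff_infix]
  have : (":REAPPLIED".toList) = ':' :: "REAPPLIED".toList := by decide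
  rw [this]
  rw [← chars_main string.toList]
  simp [List.any_map, Function.comp, PySem.Str.startswith_eq,
    PySem.Chars.startswith, List.any_eq_true]
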